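-- pv_equiv track=rewrite | github.com/Arsen1302/Code-copy-detector | TestData/solutions/problem_1236_4.py | solution_1236_4
-- ===== SOURCE A (Python) =====
-- from typing import List
--
-- def solution_1236_4(logs: List[List[int]], k: int) -> List[int]:
--     res = [0] * k
--     users = {}
--     for id,time in logs:
--         if id not in users:
--             users[id] = set()
--             users[id].add(time)
--         else:
--             users[id].add(time)
--
--
--     for user in users:
--         res[len(users[user])-1]+=1
--     return res
-- ===== SOURCE B (Python) =====
-- from typing import List
--
-- def solution_1236_4(logs: List[List[int]], k: int) -> List[int]:
--     pairs = sorted({(id, time) for id, time in logs})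
--     res = [0] * k
--     prev = None
--     run = 0
--     for id, _time in pairs:
--         if id != prev:
--             if run:
--                 res[run - 1] += 1
--             prev = id
--             run = 0
--         run += 1
--     if run:
--         res[run - 1] += 1
--     return res
-- ===== Notes on version B (the rewrite author's own statement) =====
-- stated objective: alternative
-- what changed: Replaces A's hash grouping (a dict mapping each user to a set of its times, then reading each set's size) by sort-then-scan: the distinct (id,time) pairs are sorted and a single run-length scan over the sorted list tallies each user's group length into the result buckets.
import Mathlib
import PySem

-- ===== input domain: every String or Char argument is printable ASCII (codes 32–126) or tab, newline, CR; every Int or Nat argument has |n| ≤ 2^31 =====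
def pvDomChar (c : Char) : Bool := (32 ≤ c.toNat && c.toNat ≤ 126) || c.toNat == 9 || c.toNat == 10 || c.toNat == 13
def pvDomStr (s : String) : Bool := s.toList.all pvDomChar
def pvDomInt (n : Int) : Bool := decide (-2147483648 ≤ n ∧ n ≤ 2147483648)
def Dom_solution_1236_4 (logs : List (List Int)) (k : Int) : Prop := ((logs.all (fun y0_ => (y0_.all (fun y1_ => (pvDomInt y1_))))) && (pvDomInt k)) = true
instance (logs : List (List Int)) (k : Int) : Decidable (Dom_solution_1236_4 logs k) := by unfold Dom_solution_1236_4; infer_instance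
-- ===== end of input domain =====

-- B replaces A's dict-of-sets hash grouping by sort-then-scan: sort the distinct (id,time) pairs, then one run-length scan tallies each user's group size (alternative algorithm).


-- ===== PORT A =====
-- `res[i] += 1`; exact when `i < res.length` (guaranteed inside Pre_); Python raises IndexError out of range, where List.set is a no-op.
def pvBump (res : List Int) (i : Nat) : List Int := res.set i (res.getD i 0 + 1)

-- one iteration of A's first loop; rows not of length 2 raise ValueError on unpacking in Python (outside Pre_)
def pvStepA (users : PySem.Dict Int (PySem.Set Int)) (row : List Int) : PySem.Dict Int (PySem.Set Int) :=
  match row with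
  | [id, time] =>
      if users.contains id = false then
        (PySem.Dict.insert users id (PySem.Set.empty)).modify id PySem.Set.empty
          (fun s => PySem.Set.add s time)
      else
        users.modify id PySem.Set.empty (fun s => PySem.Set.add s time)
  | _ => users

def solution_1236_4 (logs : List (List Int)) (k : Int) : List Int :=
  let res := List.replicate k.toNat (0 : Int)
  let users := logs.foldl pvStepA PySem.Dict.empty
  users.keys.foldl (fun r user => pvBump r ((users.getD user PySem.Set.empty).length - 1)) res

-- ===== PORT B =====
-- the unpacking '(id, time) for id, time in logs'; exact for length-2 rows (Pre_), Python raises otherwise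
def pvToPair (row : List Int) : Int × Int := (row.getD 0 0, row.getD 1 0)

-- one iteration of B's scan; state = (res, prev, run)
def pvScanStep (st : List Int × Option Int × Int) (p : Int × Int) : List Int × Option Int × Int :=
  if some p.1 ≠ st.2.1 then
    ((if st.2.2 ≠ 0 then pvBump st.1 (st.2.2 - 1).toNat else st.1), some p.1, 1)
  else (st.1, st.2.1, st.2.2 + 1)

-- B's trailing 'if run: res[run-1] += 1'
def pvFinish (st : List Int × Option Int × Int) : List Int :=
  if st.2.2 ≠ 0 then pvBump st.1 (st.2.2 - 1).toNat else st.1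

def solution_1236_4_alt (logs : List (List Int)) (k : Int) : List Int :=
  let pairs := PySem.List.sorted2 (PySem.Set.ofList (logs.map pvToPair)) Prod.fst Prod.snd
  let res := List.replicate k.toNat (0 : Int)
  pvFinish (pairs.foldl pvScanStep (res, none, 0))

-- ===== PRECONDITION & SPEC =====
-- Pre_ excludes exactly the inputs where Python A raises: a row that is not a pair (ValueError on
-- unpacking), and a user whose number of distinct times exceeds k (IndexError on res[len-1]).
def Pre_solution_1236_4 (logs : List (List Int)) (k : Int) : Prop :=
  (∀ row ∈ logs, row.length = 2) ∧
  (∀ row ∈ logs,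
    ((PySem.Set.ofList ((logs.filter (fun r => r.getD 0 0 == row.getD 0 0)).map
        (fun r => r.getD 1 0))).length : Int) ≤ k)
instance (logs : List (List Int)) (k : Int) : Decidable (Pre_solution_1236_4 logs k) := by
  unfold Pre_solution_1236_4; infer_instance

def pvWitness_solution_1236_4 : List (List Int) × Int := ([[1, 2], [1, 3], [2, 2]], 2)

def Spec_solution_1236_4 (logs : List (List Int)) (k : Int) (out : List Int) : Prop :=
  out = solution_1236_4_alt logs k
instance (logs : List (List Int)) (k : Int) (out : List Int) : Decidable (Spec_solution_1236_4 logs k out) := by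
  unfold Spec_solution_1236_4; infer_instance

-- ===== CLAIM (what is proved, stated in full; the proofs are below) =====
def Claim_equal_solution_1236_4 : Prop := ∀ (logs : List (List Int)) (k : Int), Dom_solution_1236_4 logs k → Pre_solution_1236_4 logs k → Spec_solution_1236_4 logs k (solution_1236_4 logs k)

-- ===== LEMMAS AND PROOFS =====

-- A's step on a pair-row is a single insert of the updated time-set.
lemma pvStepA_pair (users : PySem.Dict Int (PySem.Set Int)) (id t : Int) :
    pvStepA users [id, t]
      = users.insert id (PySem.Set.add (users.getD id PySem.Set.empty) t) := by
  by_cases hc : users.contains id = true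
  · simp [pvStepA, hc, PySem.Dict.modify]
  · have hc' : users.contains id = false := by revert hc; cases users.contains id <;> simp
    have hg : users.getD id ([] : List Int) = [] :=
      PySem.Dict.getD_of_not_contains _ _ hc'
    simp [pvStepA, hc', PySem.Dict.modify, PySem.Dict.getD_insert_self,
      PySem.Dict.insert_insert_self, hg, PySem.Set.add, PySem.Set.contains, PySem.Set.empty]

-- A's fold as a fold over the pair list (proof-side view of the same loop)
def pvStepP (d : PySem.Dict Int (PySem.Set Int)) (p : Int × Int) : PySem.Dict Int (PySem.Set Int) :=
  d.insert p.1 (PySem.Set.add (d.getD p.1 PySem.Set.empty) p.2)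

lemma pvFoldA_eq (logs : List (List Int)) (d : PySem.Dict Int (PySem.Set Int))
    (h : ∀ row ∈ logs, row.length = 2) :
    logs.foldl pvStepA d = (logs.map pvToPair).foldl pvStepP d := by
  induction logs generalizing d with
  | nil => rfl
  | cons row rest ih =>
    have hrow : row.length = 2 := h row (by simp)
    match row, hrow with
    | [a, b], _ =>
      simp only [List.foldl_cons, List.map_cons, pvStepA_pair]
      exact ih _ (fun r hr => h r (by simp [hr]))

lemma pvKeys (L : List (Int × Int)) :
    ((L.foldl pvStepP PySem.Dict.empty).keys : List Int) = PySem.Set.ofList (L.map Prod.fst) := by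
  have h := PySem.Dict.keys_foldl_insert_key (ν := PySem.Set Int) L Prod.fst
    (fun d x => PySem.Set.add (d.getD x.1 PySem.Set.empty) x.2) PySem.Dict.empty
  have h2 : (L.foldl pvStepP PySem.Dict.empty).keys
      = PySem.Set.update (PySem.Dict.empty : PySem.Dict Int (PySem.Set Int)).keys (L.map Prod.fst) := h
  rw [h2]
  have : (PySem.Dict.empty : PySem.Dict Int (PySem.Set Int)).keys = [] := by
    simp [PySem.Dict.keys, PySem.Dict.empty]
  rw [this, PySem.Set.update_nil_left]

lemma pvGetD_foldP (L : List (Int × Int)) (d : PySem.Dict Int (PySem.Set Int)) (u : Int) :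
    (L.foldl pvStepP d).getD u PySem.Set.empty
      = PySem.Set.update (d.getD u PySem.Set.empty) ((L.filter (fun p => p.1 == u)).map Prod.snd) := by
  induction L generalizing d with
  | nil => simp [PySem.Set.update]
  | cons p t ih =>
    simp only [List.foldl_cons]
    rw [ih]
    by_cases hu : p.1 = u
    · subst hu
      simp only [List.filter_cons, beq_self_eq_true, if_pos, List.map_cons]
      rw [PySem.Set.update_cons]
      congr 1
      simp [pvStepP, PySem.Dict.getD_insert_self]
    · have hb : (p.1 == u) = false := by simp [hu]
      simp only [List.filter_cons, hb]
      congr 1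
      simp [pvStepP, PySem.Dict.getD_insert, Ne.symm hu]

-- distinct times of user u = occurrences of u among the firsts of the distinct pairs
lemma pvCountF (L : List (Int × Int)) (u : Int) :
    ((PySem.Set.ofList L).map Prod.fst).count u
      = (PySem.Set.ofList ((L.filter (fun p => p.1 == u)).map Prod.snd)).length := by
  have h1 : ((PySem.Set.ofList L).map Prod.fst).count u
      = ((PySem.Set.ofList L).filter (fun p => p.1 == u)).length := by
    rw [List.count_eq_countP, List.countP_map, ← List.countP_eq_length_filter]
    rfl
  rw [h1, ← List.length_map (f := Prod.snd)]
  apply List.Perm.length_eq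
  rw [List.perm_ext_iff_of_nodup]
  · intro t
    constructor
    · intro ht
      rcases List.mem_map.mp ht with ⟨p, hp, hpt⟩
      rcases List.mem_filter.mp hp with ⟨hpL, hpu⟩
      have hpu' : p.1 = u := by simpa using hpu
      rw [PySem.Set.mem_ofList] at hpL ⊢
      exact List.mem_map.mpr ⟨p, List.mem_filter.mpr ⟨hpL, hpu⟩, hpt⟩
    · intro ht
      rw [PySem.Set.mem_ofList] at ht
      rcases List.mem_map.mp ht with ⟨p, hp, hpt⟩
      rcases List.mem_filter.mp hp with ⟨hpL, hpu⟩
      exact List.mem_map.mpr ⟨p, List.mem_filter.mpr ⟨(PySem.Set.mem_ofList L p).mpr hpL, hpu⟩, hpt⟩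
  · refine List.Nodup.map_on ?_ (List.Nodup.filter _ (PySem.Set.nodup_ofList L))
    intro x hx y hy hxy
    rcases List.mem_filter.mp hx with ⟨-, hxu⟩
    rcases List.mem_filter.mp hy with ⟨-, hyu⟩
    have hx1 : x.1 = u := by simpa using hxu
    have hy1 : y.1 = u := by simpa using hyu
    exact Prod.ext (hx1.trans hy1.symm) hxy
  · exact PySem.Set.nodup_ofList _

-- pvBump at two indices commutes
lemma pvBump_comm (r : List Int) (i j : Nat) : pvBump (pvBump r i) j = pvBump (pvBump r j) i := by
  by_cases hij : i = j
  · subst hij; rfl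
  · unfold pvBump
    have hgj : ((r.set i (r.getD i 0 + 1)).getD j 0) = r.getD j 0 := by
      simp [List.getD_eq_getElem?_getD, List.getElem?_set_ne (by omega : i ≠ j)]
    have hgi : ((r.set j (r.getD j 0 + 1)).getD i 0) = r.getD i 0 := by
      simp [List.getD_eq_getElem?_getD, List.getElem?_set_ne (by omega : j ≠ i)]
    rw [hgj, hgi]
    exact List.set_comm _ _ hij

-- the run lengths of the maximal equal-first-component groups
def pvGroupCounts : List (Int × Int) → List Nat
  | [] => []
  | p :: t => (t.takeWhile (fun q => q.1 == p.1)).length ::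
      pvGroupCounts (t.dropWhile (fun q => q.1 == p.1))
termination_by l => l.length
decreasing_by
  simp only [List.length_cons]
  have := List.length_dropWhile_le (fun q => q.1 == p.1) t
  omega

-- scanning within one group only increments the run counter
lemma pvScan_group (g : List (Int × Int)) (res : List Int) (a : Int) (r : Int)
    (h : ∀ q ∈ g, q.1 = a) :
    g.foldl pvScanStep (res, some a, r) = (res, some a, r + g.length) := by
  induction g generalizing r with
  | nil => simp
  | cons q t ih =>
    have hq : q.1 = a := h q (by simp)
    have hstep : pvScanStep (res, some a, r) q = (res, some a, r + 1) := by
      simp [pvScanStep, hq]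
    rw [List.foldl_cons, hstep, ih (r + 1) (fun x hx => h x (by simp [hx]))]
    simp; ring

-- crossing a group boundary flushes the run into the bucket
lemma pvScan_trans (rest : List (Int × Int)) (res : List Int) (a : Int) (r : Int)
    (hr : 1 ≤ r) (h : rest = [] ∨ ∃ x xs, rest = x :: xs ∧ x.1 ≠ a) :
    pvFinish (rest.foldl pvScanStep (res, some a, r))
      = pvFinish (rest.foldl pvScanStep (pvBump res (r - 1).toNat, none, 0)) := by
  rcases h with h | ⟨x, xs, hx, hxa⟩
  · subst h
    simp [pvFinish, pvBump, show r ≠ 0 by omega]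
  · subst hx
    have h1 : pvScanStep (res, some a, r) x
        = (pvBump res (r - 1).toNat, some x.1, 1) := by
      simp [pvScanStep, hxa, show r ≠ 0 by omega]
    have h2 : pvScanStep (pvBump res (r - 1).toNat, none, 0) x
        = (pvBump res (r - 1).toNat, some x.1, 1) := by
      simp [pvScanStep]
    rw [List.foldl_cons, List.foldl_cons, h1, h2]

-- head of dropWhile fails the predicate
lemma pvDropWhile_head {α : Type} (p : α → Bool) (l : List α) (x : α) (xs : List α)
    (h : l.dropWhile p = x :: xs) : p x = false := by
  induction l with
  | nil => simp at h
  | cons a t ih =>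
    rw [List.dropWhile_cons] at h
    by_cases hp : p a = true
    · rw [if_pos hp] at h; exact ih h
    · rw [if_neg hp] at h
      injection h with h1 h2
      rw [← h1]
      revert hp; cases p a <;> simp

-- the scan computes the bucket fold over the group run lengths
lemma pvScan_main (pairs : List (Int × Int)) (res : List Int)
    (hp : pairs.Pairwise (fun a b => a.1 ≤ b.1)) :
    pvFinish (pairs.foldl pvScanStep (res, none, 0))
      = (pvGroupCounts pairs).foldl pvBump res := by
  induction pairs using pvGroupCounts.induct generalizing res with
  | case1 => simp [pvFinish, pvGroupCounts]
  | case2 p t ih =>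
    set g := t.takeWhile (fun q => q.1 == p.1) with hg
    set rest := t.dropWhile (fun q => q.1 == p.1) with hrest
    have ht : g ++ rest = t := List.takeWhile_append_dropWhile
    have hga : ∀ q ∈ g, q.1 = p.1 := by
      intro q hq; simpa using List.mem_takeWhile_imp hq
    have hGC : pvGroupCounts (p :: t) = g.length :: pvGroupCounts rest := by
      rw [pvGroupCounts]
    have hstep0 : pvScanStep (res, none, 0) p = (res, some p.1, 1) := by
      simp [pvScanStep]
    have hrest' : rest = [] ∨ ∃ x xs, rest = x :: xs ∧ x.1 ≠ p.1 := by
      rcases hre : rest with _ | ⟨x, xs⟩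
      · exact Or.inl rfl
      · refine Or.inr ⟨x, xs, rfl, ?_⟩
        have hdw : t.dropWhile (fun q => q.1 == p.1) = x :: xs := by rw [← hrest]; exact hre
        have := pvDropWhile_head (fun q => q.1 == p.1) t x xs hdw
        simpa using this
    have hpt : rest.Pairwise (fun a b => a.1 ≤ b.1) :=
      hp.sublist ((List.dropWhile_sublist _).trans (List.sublist_cons_self p t))
    have hsplit : (p :: t).foldl pvScanStep (res, none, 0)
        = rest.foldl pvScanStep (res, some p.1, 1 + g.length) := by
      rw [List.foldl_cons, hstep0, ← ht, List.foldl_append, pvScan_group g res p.1 1 hga]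
    rw [hsplit, pvScan_trans rest res p.1 (1 + g.length) (by omega) hrest']
    have hidx : ((1 + (g.length : Int)) - 1).toNat = g.length := by omega
    rw [hidx, ih (pvBump res g.length) hpt, hGC, List.foldl_cons]

-- the run lengths are, up to order, (count of each distinct id among the distinct pairs) - 1
lemma pvGroupCounts_perm (pairs : List (Int × Int))
    (hp : pairs.Pairwise (fun a b => a.1 ≤ b.1)) :
    (pvGroupCounts pairs).Perm
      ((PySem.Set.ofList (pairs.map Prod.fst)).map
        (fun a => ((pairs.map Prod.fst).count a) - 1)) := by
  induction pairs using pvGroupCounts.induct with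
  | case1 => simp [pvGroupCounts]
  | case2 p t ih =>
    set g := t.takeWhile (fun q => q.1 == p.1) with hg
    set rest := t.dropWhile (fun q => q.1 == p.1) with hrest
    have ht : g ++ rest = t := List.takeWhile_append_dropWhile
    have hga : ∀ q ∈ g, q.1 = p.1 := by
      intro q hq; simpa using List.mem_takeWhile_imp hq
    have hGC : pvGroupCounts (p :: t) = g.length :: pvGroupCounts rest := by
      rw [pvGroupCounts]
    have hpt : rest.Pairwise (fun a b => a.1 ≤ b.1) :=
      hp.sublist ((List.dropWhile_sublist _).trans (List.sublist_cons_self p t))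
    have hrne : ∀ q ∈ rest, q.1 ≠ p.1 := by
      rcases hre : rest with _ | ⟨x, xs⟩
      · intro q hq; simp at hq
      · have hdw : t.dropWhile (fun q => q.1 == p.1) = x :: xs := by rw [← hrest]; exact hre
        have hx1 : x.1 ≠ p.1 := by
          have := pvDropWhile_head (fun q => q.1 == p.1) t x xs hdw
          simpa using this
        have hxt : x ∈ t := (List.dropWhile_subset _) (by rw [hdw]; simp)
        have hpx : p.1 ≤ x.1 := (List.rel_of_pairwise_cons hp) hxt
        intro q hq
        have hpt' : (x :: xs).Pairwise (fun a b => a.1 ≤ b.1) := hre ▸ hpt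
        rcases List.mem_cons.mp hq with rfl | hq'
        · exact hx1
        · have hxq : x.1 ≤ q.1 := (List.rel_of_pairwise_cons hpt') hq'
          intro hc
          have : p.1 < x.1 := lt_of_le_of_ne hpx (Ne.symm hx1)
          omega
    have hcgp : (g.map Prod.fst).count p.1 = g.length := by
      rw [List.count_eq_length.mpr, List.length_map]
      intro b hb
      rcases List.mem_map.mp hb with ⟨q, hq, rfl⟩
      simp [hga q hq]
    have hcr0 : (rest.map Prod.fst).count p.1 = 0 := by
      rw [List.count_eq_zero]
      intro hc
      rcases List.mem_map.mp hc with ⟨q, hq, hq1⟩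
      exact hrne q hq hq1
    have hcount : ∀ a : Int, ((p :: t).map Prod.fst).count a
        = (if a = p.1 then g.length + 1 else 0) + (rest.map Prod.fst).count a := by
      intro a
      rw [← ht]
      by_cases ha : a = p.1
      · subst ha
        simp [List.count_append, hcgp, hcr0]
      · have hcg0 : (g.map Prod.fst).count a = 0 := by
          rw [List.count_eq_zero]
          intro hc
          rcases List.mem_map.mp hc with ⟨q, hq, hq1⟩
          exact ha (hq1 ▸ hga q hq)
        simp [List.count_append, hcg0, ha, Ne.symm ha]
    have hnotmem : p.1 ∉ PySem.Set.ofList (rest.map Prod.fst) := by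
      rw [PySem.Set.mem_ofList]
      intro hc
      rcases List.mem_map.mp hc with ⟨q, hq, hq1⟩
      exact hrne q hq hq1
    have hperm : (PySem.Set.ofList ((p :: t).map Prod.fst)).Perm
        (p.1 :: PySem.Set.ofList (rest.map Prod.fst)) := by
      rw [List.perm_ext_iff_of_nodup (PySem.Set.nodup_ofList _)
        (List.nodup_cons.mpr ⟨hnotmem, PySem.Set.nodup_ofList _⟩)]
      intro a
      rw [PySem.Set.mem_ofList, List.mem_cons, PySem.Set.mem_ofList, ← ht]
      constructor
      · intro hmem
        rcases List.mem_cons.mp hmem with h | h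
        · exact Or.inl h
        · rcases List.mem_map.mp h with ⟨q, hq, rfl⟩
          rcases List.mem_append.mp hq with hqg | hqr
          · exact Or.inl (hga q hqg)
          · exact Or.inr (List.mem_map.mpr ⟨q, hqr, rfl⟩)
      · intro hmem
        rcases hmem with rfl | h
        · exact List.mem_cons_self
        · rcases List.mem_map.mp h with ⟨q, hq, rfl⟩
          exact List.mem_cons.mpr (Or.inr (List.mem_map.mpr ⟨q, List.mem_append.mpr (Or.inr hq), rfl⟩))
    have hFp : ((p :: t).map Prod.fst).count p.1 - 1 = g.length := by
      rw [hcount p.1]; simp [hcr0]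
    have hmapeq : (PySem.Set.ofList (rest.map Prod.fst)).map
          (fun a => ((p :: t).map Prod.fst).count a - 1)
        = (PySem.Set.ofList (rest.map Prod.fst)).map
          (fun a => (rest.map Prod.fst).count a - 1) := by
      apply List.map_congr_left
      intro a ha
      rw [PySem.Set.mem_ofList] at ha
      have hane : a ≠ p.1 := by
        rcases List.mem_map.mp ha with ⟨q, hq, rfl⟩
        exact hrne q hq
      rw [hcount a, if_neg hane, Nat.zero_add]
    rw [hGC]
    refine ((ih hpt).cons g.length).trans ?_
    have hmid : g.length :: (PySem.Set.ofList (rest.map Prod.fst)).map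
          (fun a => (rest.map Prod.fst).count a - 1)
        = (p.1 :: PySem.Set.ofList (rest.map Prod.fst)).map
          (fun a => ((p :: t).map Prod.fst).count a - 1) := by
      rw [List.map_cons, hFp, hmapeq]
    rw [hmid]
    exact (hperm.map _).symm

-- B's sort with the pair of keys is the sort under the lexicographic order
lemma pvSorted2_eq (xs : List (Int × Int)) :
    PySem.List.sorted2 xs Prod.fst Prod.snd
      = PySem.List.sorted xs (fun p : Int × Int => toLex p) := by
  have hbe : (fun (a b : Int × Int) => decide (a.1 < b.1) || (!decide (b.1 < a.1) && decide (a.2 < b.2)))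
      = (fun (a b : Int × Int) => decide ((toLex a : Lex (Int × Int)) < toLex b)) := by
    funext a b
    by_cases h1 : a.1 < b.1
    · simp [Prod.Lex.lt_iff, h1]
    · by_cases h2 : b.1 < a.1
      · have h3 : ¬ (toLex a : Lex (Int × Int)) < toLex b := by
          rw [Prod.Lex.lt_iff]
          simp only [ofLex_toLex]
          rintro (h' | ⟨h', -⟩) <;> omega
        simp [h1, h2, h3]
      · have h4 : a.1 = b.1 := by omega
        have h5 : ((toLex a : Lex (Int × Int)) < toLex b) ↔ a.2 < b.2 := by
          rw [Prod.Lex.lt_iff]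
          simp only [ofLex_toLex]
          constructor
          · rintro (h' | ⟨-, h'⟩)
            · omega
            · exact h'
          · intro h'
            exact Or.inr ⟨h4, h'⟩
        simp [h1, h2, h5]
  show xs.foldl (fun acc x => PySem.List.insertBy
      (fun a b => decide (a.1 < b.1) || (!decide (b.1 < a.1) && decide (a.2 < b.2))) x acc) []
    = xs.foldl (fun acc x => PySem.List.insertBy
      (fun a b => decide ((toLex a : Lex (Int × Int)) < toLex b)) x acc) []
  rw [hbe]

theorem solution_1236_4_spec : Claim_equal_solution_1236_4 := by
  intro logs k _ hpre
  obtain ⟨h2, -⟩ := hpre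
  unfold Spec_solution_1236_4 solution_1236_4 solution_1236_4_alt
  simp only []
  set L := logs.map pvToPair with hL
  set S := PySem.Set.ofList L with hS
  set res0 := List.replicate k.toNat (0 : Int) with hres0
  -- B side
  rw [pvSorted2_eq]
  set pairs := PySem.List.sorted S (fun p : Int × Int => toLex p) with hpairs
  have hpw : pairs.Pairwise (fun a b => a.1 ≤ b.1) := by
    refine (PySem.List.sorted_pairwise S (fun p : Int × Int => toLex p)).imp ?_
    intro a b hab
    rcases Prod.Lex.le_iff.mp hab with h | ⟨h, -⟩
    · exact le_of_lt h
    · exact le_of_eq h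
  have hBperm : (pairs.map Prod.fst).Perm (S.map Prod.fst) :=
    (PySem.List.sorted_perm S (fun p : Int × Int => toLex p) false).map Prod.fst
  rw [pvScan_main pairs res0 hpw]
  -- A side
  rw [pvFoldA_eq logs PySem.Dict.empty h2]
  set users := L.foldl pvStepP PySem.Dict.empty with husers
  have hkeys : users.keys = PySem.Set.ofList (L.map Prod.fst) := pvKeys L
  have hgetD : ∀ u : Int, users.getD u PySem.Set.empty
      = PySem.Set.ofList ((L.filter (fun p => p.1 == u)).map Prod.snd) := by
    intro u
    rw [husers, pvGetD_foldP]
    have : (PySem.Dict.empty : PySem.Dict Int (PySem.Set Int)).getD u PySem.Set.empty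
        = PySem.Set.empty := by simp [PySem.Dict.getD, PySem.Dict.get?, PySem.Dict.empty]
    rw [this]
    exact PySem.Set.update_nil_left _
  -- both sides as pvBump-folds over index lists, then compare the lists up to permutation
  have hAfold : users.keys.foldl
        (fun r user => pvBump r ((users.getD user PySem.Set.empty).length - 1)) res0
      = (users.keys.map (fun u => (users.getD u PySem.Set.empty).length - 1)).foldl pvBump res0 := by
    rw [List.foldl_map]
  rw [hAfold]
  have hcomm : RightCommutative pvBump := ⟨fun b i j => pvBump_comm b i j⟩
  have hBfold : (pvGroupCounts pairs).foldl pvBump res0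
      = ((PySem.Set.ofList (pairs.map Prod.fst)).map
          (fun a => ((pairs.map Prod.fst).count a) - 1)).foldl pvBump res0 :=
    @List.Perm.foldl_eq _ _ pvBump _ _ hcomm (pvGroupCounts_perm pairs hpw) res0
  rw [hBfold]
  -- the two index lists are permutations of each other
  have hmemfst : ∀ u : Int, u ∈ pairs.map Prod.fst ↔ u ∈ L.map Prod.fst := by
    intro u
    rw [hBperm.mem_iff]
    constructor
    · intro h
      rcases List.mem_map.mp h with ⟨p, hp, rfl⟩
      exact List.mem_map.mpr ⟨p, (PySem.Set.mem_ofList L p).mp hp, rfl⟩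
    · intro h
      rcases List.mem_map.mp h with ⟨p, hp, rfl⟩
      exact List.mem_map.mpr ⟨p, (PySem.Set.mem_ofList L p).mpr hp, rfl⟩
  have hPd : (PySem.Set.ofList (pairs.map Prod.fst)).Perm (PySem.Set.ofList (L.map Prod.fst)) := by
    rw [List.perm_ext_iff_of_nodup (PySem.Set.nodup_ofList _) (PySem.Set.nodup_ofList _)]
    intro a
    rw [PySem.Set.mem_ofList, PySem.Set.mem_ofList]
    exact hmemfst a
  have hcnt : ∀ u : Int, (pairs.map Prod.fst).count u = (S.map Prod.fst).count u :=
    fun u => hBperm.count_eq u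
  have hFeq : (PySem.Set.ofList (pairs.map Prod.fst)).map
        (fun a => ((pairs.map Prod.fst).count a) - 1)
      = (PySem.Set.ofList (pairs.map Prod.fst)).map
        (fun u => (users.getD u PySem.Set.empty).length - 1) := by
    apply List.map_congr_left
    intro a _
    rw [hcnt a, hgetD a, hS, pvCountF L a]
  rw [hFeq, hkeys]
  exact (@List.Perm.foldl_eq _ _ pvBump _ _ hcomm (hPd.map _) res0).symm
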